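-- pv_equiv track=rewrite | github.com/bengordon-dev/math-scripts | cellular-automata/cyclicrule30.py | period_check
-- ===== SOURCE A (Python) =====
-- def rule_30(l, c, r): # takes 3 bits, outputs 1
--     return l ^ (c | r)
--
-- def get_bit(x, length, index): # indices range from 1 to length inclusive going from left to right
--     return (x & (1 << (length-index))) >> (length - index) # and the number with a number only containing a 1 at the relevant index, then shift the bit to the rightmost position
--
-- def next_int(x, length):
--     out = rule_30(get_bit(x, length, length-1), get_bit(x, length, length), get_bit(x, length, 1)) # cyclic rule - the right neighbor of the last bit is the first bit
--     for i in range(2, length):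
--         out += rule_30(get_bit(x, length, i-1), get_bit(x, length, i), get_bit(x, length, i+1)) << length-i
--     return out + (rule_30(get_bit(x, length, length), get_bit(x, length, 1), get_bit(x, length, 2)) << length-1) # cyclic rule - the left neighbor of the first bit is the left bit
--
-- def period_check(n, length):
--     i, nums = 0, {}
--     while True:
--         if n in nums.keys():
--             return i - nums[n]
--         nums[n] = i
--         n = next_int(n, length)
--         i += 1
-- ===== SOURCE B (Python) =====
-- def rule_30(l, c, r):
--     return l ^ (c | r)
--
-- def get_bit(x, length, index):
--     return (x & (1 << (length-index))) >> (length - index)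
--
-- def next_int(x, length):
--     out = rule_30(get_bit(x, length, length-1), get_bit(x, length, length), get_bit(x, length, 1))
--     for i in range(2, length):
--         out += rule_30(get_bit(x, length, i-1), get_bit(x, length, i), get_bit(x, length, i+1)) << length-i
--     return out + (rule_30(get_bit(x, length, length), get_bit(x, length, 1), get_bit(x, length, 2)) << length-1)
--
-- def period_check(n, length):
--     # Floyd's cycle detection: O(1) memory, no dict of visited states.
--     tort = next_int(n, length)
--     hare = next_int(tort, length)
--     while tort != hare:
--         tort = next_int(tort, length)
--         hare = next_int(next_int(hare, length), length)
--     lam = 1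
--     hare = next_int(tort, length)
--     while tort != hare:
--         hare = next_int(hare, length)
--         lam += 1
--     return lam
-- ===== Notes on version B (the rewrite author's own statement) =====
-- stated objective: alternative
-- what changed: period_check's dict of all visited states is replaced by Floyd's two-pointer cycle detection: a slow/fast pointer loop finds a point on the cycle, then a single pointer walks once around the cycle to count its length, using O(1) memory instead of a hash map of the whole orbit.
import Mathlib
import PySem

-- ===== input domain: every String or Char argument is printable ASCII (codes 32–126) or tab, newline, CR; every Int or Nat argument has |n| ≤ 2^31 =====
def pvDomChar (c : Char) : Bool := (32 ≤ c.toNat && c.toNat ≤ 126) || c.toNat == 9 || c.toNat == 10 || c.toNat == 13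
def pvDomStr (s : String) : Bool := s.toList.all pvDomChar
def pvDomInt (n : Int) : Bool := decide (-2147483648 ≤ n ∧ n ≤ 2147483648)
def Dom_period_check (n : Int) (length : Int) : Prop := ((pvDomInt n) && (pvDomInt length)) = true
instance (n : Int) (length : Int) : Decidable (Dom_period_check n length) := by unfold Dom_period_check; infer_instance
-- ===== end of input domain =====

-- B replaces A's dict of all visited states by Floyd's two-pointer cycle detection (O(1) extra memory); return value proved equal on Pre_.

-- ===== PORT A =====
-- helpers shared verbatim by A and B (Source B keeps rule_30/get_bit/next_int unchanged)
def rule_30 (l : Int) (c : Int) (r : Int) : Int := PySem.Int.bxor l (PySem.Int.bor c r)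

-- Python's `1 << k` / `>> k`: shift amounts here are `length - index`; on Pre_ (2 ≤ length) every
-- shift amount that is evaluated is ≥ 0, so `.toNat` is exact (Python raises on a negative shift).
def get_bit (x : Int) (length : Int) (index : Int) : Int :=
  (PySem.Int.band x (1 <<< (length - index).toNat)) >>> (length - index).toNat

def next_int (x : Int) (length : Int) : Int :=
  let out := rule_30 (get_bit x length (length-1)) (get_bit x length length) (get_bit x length 1)
  let out := (PySem.List.pyRange 2 length).foldl
    (fun out i =>
      out + rule_30 (get_bit x length (i-1)) (get_bit x length i) (get_bit x length (i+1)) <<< (length - i).toNat)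
    out
  out + rule_30 (get_bit x length length) (get_bit x length 1) (get_bit x length 2) <<< (length - 1).toNat

-- A's `while True` loop with the dict of visited states; the Nat fuel only makes the loop total
-- (it is proved sufficient on Pre_), it is not part of the algorithm.
def period_check_loop (length : Int) : Nat → PySem.Dict Int Int → Int → Int → Int
  | 0, _, _, _ => 0
  | fuel+1, nums, n, i =>
    if nums.contains n then i - (nums.get? n).getD 0
    else period_check_loop length fuel (nums.insert n i) (next_int n length) (i+1)

def period_check (n : Int) (length : Int) : Int :=
  period_check_loop length (2 ^ length.toNat + 2) PySem.Dict.empty n 0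

-- ===== PORT B =====
-- Floyd: first while-loop (tortoise 1 step, hare 2 steps) — fuel again only for totality
def floyd_meet (length : Int) : Nat → Int → Int → Int
  | 0, tort, _ => tort
  | fuel+1, tort, hare =>
    if tort = hare then tort
    else floyd_meet length fuel (next_int tort length) (next_int (next_int hare length) length)

-- second while-loop: walk once around the cycle counting lam
def floyd_lam (length : Int) : Nat → Int → Int → Int → Int
  | 0, _, _, lam => lam
  | fuel+1, tort, hare, lam =>
    if tort = hare then lam
    else floyd_lam length fuel tort (next_int hare length) (lam+1)

def period_check_alt (n : Int) (length : Int) : Int :=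
  let tort := next_int n length
  let hare := next_int tort length
  let tort := floyd_meet length (2 ^ length.toNat + 2) tort hare
  floyd_lam length (2 ^ length.toNat + 2) tort (next_int tort length) 1

-- ===== PRECONDITION & SPEC =====
-- Pre_ excludes only length ≤ 1, on which both Pythons raise ValueError (negative shift count in get_bit).
def Pre_period_check (_n : Int) (length : Int) : Prop := 2 ≤ length
instance (n : Int) (length : Int) : Decidable (Pre_period_check n length) := by
  unfold Pre_period_check; infer_instance
def pvWitness_period_check : Int × Int := (0, 2)

def Spec_period_check (n : Int) (length : Int) (out : Int) : Prop := out = period_check_alt n length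
instance (n : Int) (length : Int) (out : Int) : Decidable (Spec_period_check n length out) := by unfold Spec_period_check; infer_instance

-- ===== CLAIM (what is proved, stated in full; the proofs are below) =====
def Claim_equal_period_check : Prop := ∀ (n : Int) (length : Int), Dom_period_check n length → Pre_period_check n length → Spec_period_check n length (period_check n length)

-- ===== LEMMAS AND PROOFS =====

-- the orbit of n under x ↦ next_int x length
def seqA (n : Int) (length : Int) : Nat → Int
  | 0 => n
  | k+1 => next_int (seqA n length k) length

-- the dict A's loop has built after k steps
def dseq (n : Int) (length : Int) : Nat → PySem.Dict Int Int
  | 0 => PySem.Dict.empty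
  | k+1 => (dseq n length k).insert (seqA n length k) (k : Int)

lemma band_pow_bounds (x : Int) (k : Nat) :
    0 ≤ PySem.Int.band x (2 ^ k) ∧ PySem.Int.band x (2 ^ k) ≤ 2 ^ k := by
  have hcast : ((2:Int) ^ k) = ((2 ^ k : Nat) : Int) := by push_cast; ring
  unfold PySem.Int.band
  split_ifs with h1 h2 h2
  · rw [hcast]
    constructor
    · positivity
    · have : x.toNat &&& (2^k : Nat) ≤ 2 ^ k := Nat.and_le_right
      exact_mod_cast this
  · exact absurd (by positivity) h2
  · rw [hcast]
    constructor
    · positivity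
    · have : (2^k:Nat) - ((2^k:Nat) &&& (-x-1).toNat) ≤ 2^k := Nat.sub_le _ _
      simp only [Int.toNat_natCast]
      exact_mod_cast this
  · exact absurd (by positivity) h2

lemma get_bit_01 (x length index : Int) : get_bit x length index = 0 ∨ get_bit x length index = 1 := by
  unfold get_bit
  set k := (length - index).toNat with hk
  have h1 : ((1 <<< k : Nat) : Int) = 2 ^ k := by simp [Nat.shiftLeft_eq]
  rw [h1]
  obtain ⟨hlo, hhi⟩ := band_pow_bounds x k
  set v := PySem.Int.band x (2 ^ k) with hv
  rw [Int.shiftRight_eq_div_pow]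
  rcases lt_or_eq_of_le hhi with h | h
  · exact Or.inl (Int.ediv_eq_zero_of_lt hlo (by exact_mod_cast h))
  · right
    rw [h]
    have h2 : ((2:Int)^k : Int) = ((2^k : Nat) : Int) := by push_cast; ring
    rw [h2, Int.ediv_self (by positivity)]

lemma rule_30_01 {l c r : Int} (hl : l = 0 ∨ l = 1) (hc : c = 0 ∨ c = 1) (hr : r = 0 ∨ r = 1) :
    rule_30 l c r = 0 ∨ rule_30 l c r = 1 := by
  rcases hl with rfl | rfl <;> rcases hc with rfl | rfl <;> rcases hr with rfl | rfl <;> simp [rule_30] <;> decide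

lemma shl_bounds {b : Int} (hb : b = 0 ∨ b = 1) (k : Nat) : 0 ≤ b <<< k ∧ b <<< k ≤ 2 ^ k := by
  rcases hb with rfl | rfl <;> simp [Int.shiftLeft_eq]


lemma term_bounds (x length i : Int) (k : Nat) :
    0 ≤ rule_30 (get_bit x length (i-1)) (get_bit x length i) (get_bit x length (i+1)) <<< k ∧
    rule_30 (get_bit x length (i-1)) (get_bit x length i) (get_bit x length (i+1)) <<< k ≤ 2 ^ k :=
  shl_bounds (rule_30_01 (get_bit_01 _ _ _) (get_bit_01 _ _ _) (get_bit_01 _ _ _)) k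

lemma fold_bd (x length : Int) (h2 : 2 ≤ length) :
    ∀ b : Nat, 2 ≤ b → (b : Int) ≤ length → ∀ acc : Int, 0 ≤ acc → acc ≤ 1 →
      0 ≤ (PySem.List.pyRange 2 (b:Int)).foldl
        (fun out i =>
          out + rule_30 (get_bit x length (i-1)) (get_bit x length i) (get_bit x length (i+1)) <<< (length - i).toNat) acc ∧
      (PySem.List.pyRange 2 (b:Int)).foldl
        (fun out i =>
          out + rule_30 (get_bit x length (i-1)) (get_bit x length i) (get_bit x length (i+1)) <<< (length - i).toNat) acc
        ≤ 1 + ((2:Int) ^ (length.toNat - 1) - 2 ^ (length.toNat - b + 1)) := by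
  have hL : (length.toNat : Int) = length := Int.toNat_of_nonneg (by omega)
  intro b hb2
  induction b, hb2 using Nat.le_induction with
  | base =>
      intro _ acc h0 h1
      have hnil : PySem.List.pyRange 2 ((2:Nat):Int) = [] := by norm_num
      rw [hnil]
      simp only [List.foldl_nil]
      refine ⟨h0, ?_⟩
      have he : length.toNat - 2 + 1 = length.toNat - 1 := by omega
      rw [he]; omega
  | succ b hb ih =>
      intro hble acc h0 h1
      have hbL : b + 1 ≤ length.toNat := by omega
      have hcast : (((b+1:Nat)):Int) = (b:Int) + 1 := by norm_cast
      rw [hcast, PySem.List.pyRange_one_succ_right (by exact_mod_cast Nat.cast_le.mpr hb)]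
      rw [List.foldl_append]
      simp only [List.foldl_cons, List.foldl_nil]
      obtain ⟨hf0, hf1⟩ := ih (by omega) acc h0 h1
      have hk : (length - (b:Int)).toNat = length.toNat - b := by omega
      rw [hk]
      obtain ⟨ht0, ht1⟩ := term_bounds x length (b:Int) (length.toNat - b)
      have hpow1 : (2:Int) ^ (length.toNat - b + 1) = 2 ^ (length.toNat - b) * 2 := pow_succ 2 _
      have hidx : length.toNat - (b+1) + 1 = length.toNat - b := by omega
      rw [hidx]
      exact ⟨by positivity, by omega⟩

lemma next_int_bounds (x length : Int) (h2 : 2 ≤ length) :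
    0 ≤ next_int x length ∧ next_int x length < 2 ^ length.toNat := by
  have hL : (length.toNat : Int) = length := Int.toNat_of_nonneg (by omega)
  have hL2 : 2 ≤ length.toNat := by omega
  have hacc := rule_30_01 (get_bit_01 x length (length-1)) (get_bit_01 x length length) (get_bit_01 x length 1)
  obtain ⟨hf0, hf1⟩ := fold_bd x length h2 length.toNat hL2 (le_of_eq hL)
      (rule_30 (get_bit x length (length-1)) (get_bit x length length) (get_bit x length 1))
      (by rcases hacc with h|h <;> omega) (by rcases hacc with h|h <;> omega)
  rw [hL] at hf0 hf1
  have hlast := shl_bounds (rule_30_01 (get_bit_01 x length length) (get_bit_01 x length 1) (get_bit_01 x length 2)) (length - 1).toNat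
  have hk : (length - 1).toNat = length.toNat - 1 := by omega
  rw [hk] at hlast
  have hee : length.toNat - length.toNat + 1 = 1 := by omega
  rw [hee] at hf1
  have hpow : (2:Int) ^ length.toNat = 2 ^ (length.toNat - 1) * 2 := by
    rw [← pow_succ]; congr 1; omega
  unfold next_int
  dsimp only
  rw [hk]
  constructor
  · omega
  · omega

lemma seqA_bounds (n length : Int) (h2 : 2 ≤ length) (k : Nat) (hk : 1 ≤ k) :
    0 ≤ seqA n length k ∧ seqA n length k < 2 ^ length.toNat := by
  obtain ⟨k, rfl⟩ : ∃ m, k = m + 1 := ⟨k - 1, by omega⟩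
  exact next_int_bounds _ _ h2

lemma exists_repeat (n length : Int) (h2 : 2 ≤ length) :
    ∃ i, i ≤ 2 ^ length.toNat + 1 ∧ ∃ j, j < i ∧ seqA n length j = seqA n length i := by
  have hmaps : ∀ a ∈ Finset.range (2 ^ length.toNat + 1),
      seqA n length (a+1) ∈ Finset.Icc (0:ℤ) (2 ^ length.toNat - 1) := by
    intro a _
    obtain ⟨h0, h1⟩ := seqA_bounds n length h2 (a+1) (by omega)
    rw [Finset.mem_Icc]
    omega
  have hcard : (Finset.Icc (0:ℤ) (2 ^ length.toNat - 1)).card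
      < (Finset.range (2 ^ length.toNat + 1)).card := by
    rw [Int.card_Icc, Finset.card_range]
    have : ((2:Int) ^ length.toNat - 1 + 1 - 0) = ((2 ^ length.toNat : Nat) : Int) := by
      push_cast; ring
    rw [this, Int.toNat_natCast]
    omega
  obtain ⟨a, ha, b, hb, hne, heq⟩ := Finset.exists_ne_map_eq_of_card_lt_of_maps_to hcard hmaps
  rw [Finset.mem_range] at ha hb
  rcases Nat.lt_or_ge a b with h | h
  · exact ⟨b+1, by omega, a+1, by omega, heq⟩
  · exact ⟨a+1, by omega, b+1, by omega, heq.symm⟩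

lemma seq_shift {n length : Int} {a b : Nat} (h : seqA n length a = seqA n length b) :
    ∀ t, seqA n length (a + t) = seqA n length (b + t) := by
  intro t
  induction t with
  | zero => simpa using h
  | succ t ih => simpa [seqA, Nat.add_succ] using congrArg (next_int · length) ih

lemma seq_cyc {n length : Int} {m p : Nat} (hp : seqA n length (m + p) = seqA n length m) :
    ∀ q t, seqA n length (m + t + q * p) = seqA n length (m + t) := by
  intro q
  induction q with
  | zero => simp
  | succ q ih =>
      intro t
      have h1 := seq_shift hp (t + q * p)
      have e1 : m + p + (t + q * p) = m + t + (q + 1) * p := by ring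
      have e2 : m + (t + q * p) = m + t + q * p := by ring
      rw [e1, e2] at h1
      rw [h1, ih t]

lemma dvd_of_seq_eq {n length : Int} {μ lam m p : Nat} (hmum : μ ≤ m)
    (hmulam : seqA n length (μ + lam) = seqA n length μ)
    (hmin : ∀ q, 0 < q → q < lam → seqA n length (μ + q) ≠ seqA n length μ)
    (hlampos : 0 < lam) (_hp : 0 < p) (h : seqA n length (m + p) = seqA n length m) : lam ∣ p := by
  set s := m - μ with hs0
  have hm : m = μ + s := by omega
  have hms : seqA n length (m + lam) = seqA n length m := by
    have h1 := seq_shift hmulam s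
    rw [show μ + lam + s = m + lam from by omega, show μ + s = m from by omega] at h1
    exact h1
  set r := p % lam with hr
  set q := p / lam with hq
  have hpq : r + q * lam = p := Nat.mod_add_div' p lam
  have hrlt : r < lam := Nat.mod_lt _ hlampos
  have h2 : seqA n length (m + r) = seqA n length m := by
    have h3 := seq_cyc hms q r
    rw [show m + r + q * lam = m + p from by omega] at h3
    exact h3.symm.trans h
  rcases Nat.eq_zero_or_pos r with h0 | hrpos
  · exact ⟨q, by rw [Nat.mul_comm lam q]; omega⟩
  · exfalso
    set u := s * (lam - 1) with hu
    have hlam1 : lam - 1 + 1 = lam := by omega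
    have hsl : s * lam = s * (lam - 1) + s := by
      calc s * lam = s * (lam - 1 + 1) := by rw [hlam1]
        _ = s * (lam - 1) + s := by ring
    have hc1 : seqA n length (μ + s * lam) = seqA n length μ := by
      have h4 := seq_cyc hmulam s 0
      rw [show μ + 0 + s * lam = μ + s * lam from by omega, show μ + 0 = μ from by omega] at h4
      exact h4
    have hA : seqA n length (m + u) = seqA n length μ := by
      rw [show m + u = μ + s * lam from by omega]
      exact hc1
    have hB : seqA n length (m + r + u) = seqA n length (μ + r) := by
      rw [show m + r + u = μ + r + s * lam from by omega]
      exact seq_cyc hmulam s r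
    have hC := seq_shift h2 u
    exact hmin r hrpos hrlt (by rw [← hB, hC, hA])

lemma get?_dseq_none {n length : Int} {k : Nat} {x : Int}
    (h : ∀ j, j < k → seqA n length j ≠ x) : (dseq n length k).get? x = none := by
  induction k with
  | zero => simp [dseq, PySem.Dict.get?_empty]
  | succ k ih =>
      rw [dseq, PySem.Dict.get?_insert]
      rw [if_neg (fun hx => h k (by omega) hx.symm)]
      exact ih (fun j hj => h j (by omega))

lemma get?_dseq_some {n length : Int} {k j : Nat} {x : Int} (hjk : j < k)
    (hx : seqA n length j = x) (huniq : ∀ j', j' < k → j' ≠ j → seqA n length j' ≠ x) :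
    (dseq n length k).get? x = some (j : Int) := by
  induction k with
  | zero => omega
  | succ k ih =>
      rw [dseq, PySem.Dict.get?_insert]
      by_cases hj : j = k
      · subst hj; rw [if_pos hx.symm]
      · rw [if_neg (fun hx' => huniq k (by omega) (fun h => hj h.symm) hx'.symm)]
        exact ih (by omega) (fun j' hj' => huniq j' (by omega))

lemma loopA_spec {n length : Int} {I J : Nat}
    (hJI : J < I) (hJeq : seqA n length J = seqA n length I)
    (hImin : ∀ i', i' < I → ¬ ∃ j, j < i' ∧ seqA n length j = seqA n length i')
    (hJmin : ∀ j', j' < J → seqA n length j' ≠ seqA n length I) :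
    ∀ fuel k, k ≤ I → I - k < fuel →
      period_check_loop length fuel (dseq n length k) (seqA n length k) (k : Int)
        = (I : Int) - (J : Int) := by
  intro fuel
  induction fuel with
  | zero => intro k _ h; omega
  | succ fuel ih =>
      intro k hkI hfuel
      rw [period_check_loop]
      rcases Nat.lt_or_ge k I with hk | hk
      · have hnone : (dseq n length k).get? (seqA n length k) = none := by
          apply get?_dseq_none
          intro j hj hEq
          exact hImin k hk ⟨j, hj, hEq⟩
        rw [PySem.Dict.contains_eq_isSome_get?, hnone]
        simp only [Option.isSome_none, Bool.false_eq_true, if_false]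
        have e1 : (dseq n length k).insert (seqA n length k) (k : Int) = dseq n length (k+1) := rfl
        have e2 : next_int (seqA n length k) length = seqA n length (k+1) := rfl
        have e3 : (k : Int) + 1 = ((k+1 : Nat) : Int) := by push_cast; ring
        rw [e1, e2, e3]
        exact ih (k+1) (by omega) (by omega)
      · have hkeq : k = I := by omega
        subst hkeq
        have hsome : (dseq n length k).get? (seqA n length k) = some (J : Int) := by
          apply get?_dseq_some hJI hJeq
          intro j' hj' hne hEq
          rcases Nat.lt_or_ge j' J with hlt | hge
          · exact hJmin j' hlt hEq
          · exact hImin j' (by omega) ⟨J, by omega, hJeq.trans hEq.symm⟩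
        rw [PySem.Dict.contains_eq_isSome_get?, hsome]
        simp

lemma loop1_spec {n length : Int} {ms : Nat}
    (hprop : 0 < ms ∧ seqA n length ms = seqA n length (2 * ms))
    (hm_min : ∀ m, 0 < m → m < ms → seqA n length m ≠ seqA n length (2 * m)) :
    ∀ fuel m, 1 ≤ m → m ≤ ms → ms - m < fuel →
      floyd_meet length fuel (seqA n length m) (seqA n length (2 * m)) = seqA n length ms := by
  intro fuel
  induction fuel with
  | zero => intro m _ _ h; omega
  | succ fuel ih =>
      intro m hm1 hms hfuel
      rw [floyd_meet]
      by_cases heq : seqA n length m = seqA n length (2 * m)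
      · rw [if_pos heq]
        have : ms ≤ m := by
          by_contra hlt
          exact hm_min m hm1 (by omega) heq
        congr 1
        omega
      · rw [if_neg heq]
        have hne : m ≠ ms := fun hc => heq (hc ▸ hprop.2)
        have e1 : next_int (seqA n length m) length = seqA n length (m+1) := rfl
        have e2 : next_int (next_int (seqA n length (2*m)) length) length
            = seqA n length (2*(m+1)) := by
          have : 2*(m+1) = 2*m + 1 + 1 := by omega
          rw [this]
          rfl
        rw [e1, e2]
        exact ih (m+1) (by omega) (by omega) (by omega)

lemma loop2_spec {n length : Int} {ms lam : Nat}
    (hiff : ∀ p, 0 < p → (seqA n length (ms + p) = seqA n length ms ↔ lam ∣ p))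
    (hlampos : 0 < lam) :
    ∀ fuel l, 1 ≤ l → l ≤ lam → lam - l < fuel →
      floyd_lam length fuel (seqA n length ms) (seqA n length (ms + l)) (l : Int) = (lam : Int) := by
  intro fuel
  induction fuel with
  | zero => intro l _ _ h; omega
  | succ fuel ih =>
      intro l hl1 hllam hfuel
      rw [floyd_lam]
      rcases Nat.lt_or_ge l lam with hl | hl
      · have hne : ¬ (seqA n length ms = seqA n length (ms + l)) := by
          intro hc
          have hdvd := (hiff l (by omega)).mp hc.symm
          have := Nat.le_of_dvd (by omega) hdvd
          omega
        rw [if_neg hne]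
        have e1 : next_int (seqA n length (ms + l)) length = seqA n length (ms + (l+1)) := rfl
        have e2 : (l : Int) + 1 = ((l+1 : Nat) : Int) := by push_cast; ring
        rw [e1, e2]
        exact ih (l+1) (by omega) (by omega) (by omega)
      · have hleq : l = lam := by omega
        subst hleq
        have heq : seqA n length (ms + l) = seqA n length ms := (hiff l (by omega)).mpr dvd_rfl
        rw [if_pos heq.symm]

lemma exists_floyd_point {n length : Int} {μ lam : Nat}
    (hmulam : seqA n length (μ + lam) = seqA n length μ) (hlampos : 0 < lam) :
    ∃ m, 0 < m ∧ m ≤ μ + lam ∧ seqA n length m = seqA n length (2 * m) := by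
  set q := max 1 ((μ + lam - 1) / lam) with hq
  refine ⟨lam * q, by positivity, ?_, ?_⟩
  · rcases Nat.eq_zero_or_pos μ with h0 | hμpos
    · have : (lam - 1) / lam = 0 := Nat.div_eq_of_lt (by omega)
      have hq1 : q = 1 := by rw [hq, h0]; simp [this]
      rw [hq1]; omega
    · have hge : 1 ≤ (μ + lam - 1) / lam := by
        apply Nat.one_le_div_iff hlampos |>.mpr
        omega
      have hq1 : q = (μ + lam - 1) / lam := by rw [hq]; omega
      rw [hq1]
      have := Nat.div_mul_le_self (μ + lam - 1) lam
      calc lam * ((μ + lam - 1) / lam) = (μ + lam - 1) / lam * lam := Nat.mul_comm _ _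
        _ ≤ μ + lam - 1 := Nat.div_mul_le_self _ _
        _ ≤ μ + lam := by omega
  · -- μ ≤ lam * q
    have hmu_le : μ ≤ lam * q := by
      rcases Nat.eq_zero_or_pos μ with h0 | hμpos
      · omega
      · have hdm := Nat.div_add_mod (μ + lam - 1) lam
        have hmlt := Nat.mod_lt (μ + lam - 1) hlampos
        have hge : 1 ≤ (μ + lam - 1) / lam := Nat.one_le_div_iff hlampos |>.mpr (by omega)
        have hq1 : q = (μ + lam - 1) / lam := by rw [hq]; omega
        rw [hq1]
        set d := (μ + lam - 1) / lam
        set m' := (μ + lam - 1) % lam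
        omega
    -- period at lam*q
    have hper : seqA n length (lam * q + lam) = seqA n length (lam * q) := by
      have h1 := seq_shift hmulam (lam * q - μ)
      rw [show μ + lam + (lam * q - μ) = lam * q + lam from by omega,
          show μ + (lam * q - μ) = lam * q from by omega] at h1
      exact h1
    have h2 := seq_cyc hper q 0
    rw [show lam * q + 0 + q * lam = 2 * (lam * q) from by rw [Nat.mul_comm q lam]; omega,
        show lam * q + 0 = lam * q from by omega] at h2
    exact h2.symm

lemma period_check_key (n length : Int) (h2 : 2 ≤ length) :
    period_check n length = period_check_alt n length := by
  classical
  obtain ⟨iW, hiW, jW, hjW, hjEq⟩ := exists_repeat n length h2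
  have hPI : ∃ i, ∃ j, j < i ∧ seqA n length j = seqA n length i := ⟨iW, jW, hjW, hjEq⟩
  set I := Nat.find hPI with hIdef
  obtain ⟨j0, hj0I, hj0Eq⟩ := Nat.find_spec hPI
  have hImin : ∀ i', i' < I → ¬ ∃ j, j < i' ∧ seqA n length j = seqA n length i' :=
    fun i' hi' => Nat.find_min hPI hi'
  have hIle : I ≤ 2 ^ length.toNat + 1 :=
    le_trans (Nat.find_min' hPI ⟨jW, hjW, hjEq⟩) hiW
  have hQ : ∃ j, seqA n length j = seqA n length I := ⟨j0, hj0Eq⟩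
  set J := Nat.find hQ with hJdef
  have hJEq : seqA n length J = seqA n length I := Nat.find_spec hQ
  have hJle : J ≤ j0 := Nat.find_min' hQ hj0Eq
  have hJI : J < I := by omega
  have hJmin : ∀ j', j' < J → seqA n length j' ≠ seqA n length I := fun j' h => Nat.find_min hQ h
  have hPmu : ∃ m, ∃ p, 0 < p ∧ seqA n length (m + p) = seqA n length m :=
    ⟨J, I - J, by omega, by rw [show J + (I - J) = I from by omega]; exact hJEq.symm⟩
  set mu := Nat.find hPmu with hmudef
  have hmuspec := Nat.find_spec hPmu
  have hmule : mu ≤ J := Nat.find_min' hPmu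
    ⟨I - J, by omega, by rw [show J + (I - J) = I from by omega]; exact hJEq.symm⟩
  set lam := Nat.find hmuspec with hlamdef
  obtain ⟨hlampos, hmulam⟩ := Nat.find_spec hmuspec
  have hlammin : ∀ p', 0 < p' → p' < lam → seqA n length (mu + p') ≠ seqA n length mu := by
    intro p' hp1 hp2 hc
    exact Nat.find_min hmuspec hp2 ⟨hp1, hc⟩
  have hdvd : ∀ m p, mu ≤ m → 0 < p → seqA n length (m+p) = seqA n length m → lam ∣ p :=
    fun m p hm hp h => dvd_of_seq_eq hm hmulam hlammin hlampos hp h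
  have hIle2 : I ≤ mu + lam := Nat.find_min' hPI ⟨mu, by omega, hmulam.symm⟩
  have hlamIJ : lam ∣ (I - J) := hdvd J (I - J) hmule (by omega)
    (by rw [show J + (I - J) = I from by omega]; exact hJEq.symm)
  have hlamle : lam ≤ I - J := Nat.le_of_dvd (by omega) hlamIJ
  have hIeq : I = mu + lam := by omega
  have hJeq2 : J = mu := by
    have hJle2 : J ≤ mu := Nat.find_min' hQ
      (show seqA n length mu = seqA n length I by rw [hIeq]; exact hmulam.symm)
    omega
  obtain ⟨m0, hm0pos, hm0le, hm0eq⟩ := exists_floyd_point hmulam hlampos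
  have hPm : ∃ m, 0 < m ∧ seqA n length m = seqA n length (2*m) := ⟨m0, hm0pos, hm0eq⟩
  set ms := Nat.find hPm with hmsdef
  obtain ⟨hmspos, hmseq⟩ := Nat.find_spec hPm
  have hmsmin : ∀ m, 0 < m → m < ms → seqA n length m ≠ seqA n length (2*m) := by
    intro m h1 h2 hc
    exact Nat.find_min hPm h2 ⟨h1, hc⟩
  have hmsle : ms ≤ m0 := Nat.find_min' hPm ⟨hm0pos, hm0eq⟩
  have hmums : mu ≤ ms := Nat.find_min' hPmu
    ⟨ms, by omega, by rw [show ms + ms = 2*ms from by omega]; exact hmseq.symm⟩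
  have hmsper : seqA n length (ms + lam) = seqA n length ms := by
    have h1 := seq_shift hmulam (ms - mu)
    rw [show mu + lam + (ms - mu) = ms + lam from by omega,
        show mu + (ms - mu) = ms from by omega] at h1
    exact h1
  have hiff : ∀ p, 0 < p → (seqA n length (ms + p) = seqA n length ms ↔ lam ∣ p) := by
    intro p hp
    constructor
    · exact hdvd ms p hmums hp
    · rintro ⟨c, rfl⟩
      have h2 := seq_cyc hmsper c 0
      have e : ms + 0 + c * lam = ms + lam * c := by ring
      rw [e, show ms + 0 = ms from by omega] at h2
      exact h2
  have hA : period_check n length = (I : Int) - (J : Int) := by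
    have h0 := loopA_spec hJI hJEq hImin hJmin (2 ^ length.toNat + 2) 0 (by omega) (by omega)
    unfold period_check
    simpa only [dseq, seqA, Nat.cast_zero] using h0
  have hB : period_check_alt n length = (lam : Int) := by
    unfold period_check_alt
    dsimp only
    have e1 : next_int n length = seqA n length 1 := rfl
    have e2 : next_int (seqA n length 1) length = seqA n length (2*1) := rfl
    rw [e1, e2]
    rw [loop1_spec ⟨hmspos, hmseq⟩ hmsmin (2 ^ length.toNat + 2) 1 le_rfl (by omega) (by omega)]
    have e3 : next_int (seqA n length ms) length = seqA n length (ms + 1) := rfl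
    rw [e3]
    have h4 := loop2_spec hiff hlampos (2 ^ length.toNat + 2) 1 le_rfl (by omega) (by omega)
    simpa only [Nat.cast_one] using h4
  rw [hA, hB, hIeq, hJeq2]
  push_cast
  ring

-- ===== VERDICT (by name: the statement is the Claim_ definition above) =====
theorem period_check_spec : Claim_equal_period_check := by
  intro n length _ hpre
  unfold Spec_period_check
  exact period_check_key n length hpre
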